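-- pv_equiv track=rewrite | github.com/AryanK1511/LeetGod | 001-Arrays-and-Strings/002_sliding_window.py | longest_binary_substring
-- ===== SOURCE A (Python) =====
-- def longest_binary_substring(s):
--     left, num_zeroes, ans = 0, 0, 0
--
--     for right in range(len(s)):
--         if s[right] == "0":
--             num_zeroes += 1
--         while num_zeroes > 1:
--             if s[left] == "0":
--                 num_zeroes -= 1
--             left += 1
--         ans = max(ans, right - left + 1)
--     return ans
-- ===== SOURCE B (Python) =====
-- def longest_binary_substring(s):
--     # run lengths of maximal '0'-free chunks; each adjacent pair joined through one '0'
--     g = [len(p) for p in s.split("0")]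
--     pairs = list(zip(g, g[1:]))
--     if not pairs:
--         return g[0]
--     return max(x + 1 + y for x, y in pairs)
-- ===== Notes on version B (the rewrite author's own statement) =====
-- stated objective: simpler
-- what changed: Replaces the two-pointer sliding window with a run-length table (split on '0') and a single max over adjacent run pairs joined through the zero between them.
import Mathlib
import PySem

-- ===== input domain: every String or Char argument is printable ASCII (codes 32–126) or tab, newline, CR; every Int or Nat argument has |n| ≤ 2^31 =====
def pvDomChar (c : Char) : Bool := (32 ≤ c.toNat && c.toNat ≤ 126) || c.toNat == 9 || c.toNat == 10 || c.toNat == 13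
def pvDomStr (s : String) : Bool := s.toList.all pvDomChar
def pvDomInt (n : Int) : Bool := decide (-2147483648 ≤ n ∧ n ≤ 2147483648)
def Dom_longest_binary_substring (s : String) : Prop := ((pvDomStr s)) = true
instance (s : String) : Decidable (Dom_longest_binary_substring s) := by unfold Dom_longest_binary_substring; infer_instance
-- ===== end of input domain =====

-- B replaces A's two-pointer sliding window by a run-length table (split on '0') and one
-- max over adjacent run pairs; objective: simpler. Both programs are total; the return
-- values are proved equal on all strings.

-- ===== PORT A =====
-- the inner `while num_zeroes > 1` loop; fuel-based (the loop advances `left` at most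
-- once per character, so fuel = len(s) suffices on every state A's loop reaches)
def lbsWhile (cs : List Char) : Nat → Int → Int → Int × Int
  | 0, left, zeros => (left, zeros)
  | fuel+1, left, zeros =>
    if zeros > 1 then
      lbsWhile cs fuel (left + 1)
        (if PySem.List.pyGet? cs left = some '0' then zeros - 1 else zeros)
    else (left, zeros)

-- one iteration of A's `for right in range(len(s))` body, state = (left, num_zeroes, ans)
def lbsStep (cs : List Char) (st : Int × Int × Int) (right : Int) : Int × Int × Int :=
  let zeros := if PySem.List.pyGet? cs right = some '0' then st.2.1 + 1 else st.2.1
  let lz := lbsWhile cs cs.length st.1 zeros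
  (lz.1, lz.2, max st.2.2 (right - lz.1 + 1))

def longest_binary_substring (s : String) : Int :=
  let cs := s.toList
  ((PySem.List.pyRange 0 cs.length 1).foldl (lbsStep cs) (0, 0, 0)).2.2

-- ===== PORT B =====
-- Source B: g = [len(p) for p in s.split("0")]; pairs = list(zip(g, g[1:]));
--       return g[0] if not pairs else max(x+1+y for x,y in pairs)
-- (s.split("0") with this non-empty literal separator is PySem.Chars.splitOn;
--  Python's max over the non-empty generator is a fold of max from its first element)
def longest_binary_substring_alt (s : String) : Int :=
  let g : List Int := (PySem.Chars.splitOn s.toList ['0']).map (fun p => (p.length : Int))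
  match g, g.zip g.tail with
  | g0 :: _, [] => g0
  | _, p :: ps => ps.foldl (fun m q => max m (q.1 + 1 + q.2)) (p.1 + 1 + p.2)
  | [], [] => 0    -- unreachable: split never returns an empty list

-- ===== PRECONDITION & SPEC =====
def Spec_longest_binary_substring (s : String) (out : Int) : Prop := out = longest_binary_substring_alt s
instance (s : String) (out : Int) : Decidable (Spec_longest_binary_substring s out) := by unfold Spec_longest_binary_substring; infer_instance

-- ===== CLAIM (what is proved, stated in full; the proofs are below) =====
def Claim_equal_longest_binary_substring : Prop := ∀ (s : String), Dom_longest_binary_substring s → Spec_longest_binary_substring s (longest_binary_substring s)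

-- ===== LEMMAS AND PROOFS =====

-- left-to-right scanner: a = current run of non-'0' chars, b = current window (≤ 1 zero),
-- best = running maximum; the common reference point for both ports
def lbsG : List Char → Nat → Nat → Nat → Nat
  | [], _, _, best => best
  | c :: t, a, b, best =>
      if c = '0' then lbsG t 0 (a+1) (max best (a+1))
      else lbsG t (a+1) (b+1) (max best (b+1))

-- run lengths of the maximal '0'-free chunks (lengths of the s.split("0") pieces)
def lbsRl : List Char → List Nat
  | [] => [0]
  | c :: t => if c = '0' then 0 :: lbsRl t else
      match lbsRl t with
      | r :: rs => (r+1) :: rs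
      | [] => [1]

-- the chunks themselves (what splitOn returns)
def lbsRuns : List Char → List (List Char)
  | [] => [[]]
  | c :: t => if c = '0' then [] :: lbsRuns t else
      match lbsRuns t with
      | r :: rs => (c :: r) :: rs
      | [] => [[c]]

-- best window obtainable in the remaining runs, entered with ones-run a and window b
def lbsM : Nat → Nat → List Nat → Nat
  | _, b, [] => b
  | _, b, [r0] => b + r0
  | a, b, r0 :: r1 :: rs => max (b + r0) (lbsM 0 (a + r0 + 1) (r1 :: rs))

-- no '0' at any position in [i, j)
def lbsNoZ (cs : List Char) (i j : Nat) : Prop := ∀ k, i ≤ k → k < j → cs[k]? ≠ some '0'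

-- invariant of A's outer loop after processing indices < r, in terms of the scanner state
def lbsInv (cs : List Char) (r a b : Nat) : Prop :=
  a ≤ b ∧ b ≤ r ∧ lbsNoZ cs (r - a) r ∧
  (if '0' ∈ cs.take r
   then a < b ∧ cs[r - 1 - a]? = some '0' ∧ lbsNoZ cs (r - b) (r - 1 - a)
   else a = r ∧ b = r)

lemma lbsM_single (a b r0 : Nat) : lbsM a b [r0] = b + r0 := rfl

lemma lbsM_cons_cons (a b r0 r1 : Nat) (rs : List Nat) :
    lbsM a b (r0 :: r1 :: rs) = max (b + r0) (lbsM 0 (a + r0 + 1) (r1 :: rs)) := rfl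

lemma lbsRuns_ne_nil (cs : List Char) : lbsRuns cs ≠ [] := by
  cases cs with
  | nil => simp [lbsRuns]
  | cons c t => unfold lbsRuns; split; · simp
                split <;> simp

lemma lbsRl_ne_nil (cs : List Char) : lbsRl cs ≠ [] := by
  cases cs with
  | nil => simp [lbsRl]
  | cons c t => unfold lbsRl; split; · simp
                split <;> simp

lemma lbs_go_eq (fuel : Nat) : ∀ (l cur : List Char) (acc : List (List Char)),
    l.length < fuel →
    PySem.Chars.splitOn.go ['0'] fuel l cur acc =
      acc.reverse ++ (match lbsRuns l with
                      | r :: rs => (cur.reverse ++ r) :: rs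
                      | [] => [cur.reverse]) := by
  induction fuel with
  | zero => intro l cur acc h; omega
  | succ f ih =>
    intro l cur acc h
    cases l with
    | nil => simp [PySem.Chars.splitOn.go, lbsRuns]
    | cons c rest =>
      by_cases hc : c = '0'
      · have hp : List.isPrefixOf ['0'] (c :: rest) = true := by
          simp [List.isPrefixOf, hc]
        rw [PySem.Chars.splitOn.go, if_pos hp]
        simp only [List.length_cons] at h
        rw [show List.drop (['0'] : List Char).length (c :: rest) = rest by simp]
        rw [ih rest [] (cur.reverse :: acc) (by omega)]
        rw [lbsRuns, if_pos hc]
        cases hr : lbsRuns rest with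
        | nil => exact absurd hr (lbsRuns_ne_nil rest)
        | cons r rs => simp
      · have hp : List.isPrefixOf ['0'] (c :: rest) = false := by
          simp [List.isPrefixOf]; exact fun h' => absurd h'.symm hc
        rw [PySem.Chars.splitOn.go, if_neg (by simp [hp])]
        simp only [List.length_cons] at h
        rw [ih rest (c :: cur) acc (by omega)]
        rw [lbsRuns, if_neg hc]
        cases hr : lbsRuns rest with
        | nil => exact absurd hr (lbsRuns_ne_nil rest)
        | cons r rs => simp

lemma lbs_splitOn_eq (cs : List Char) : PySem.Chars.splitOn cs ['0'] = lbsRuns cs := by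
  rw [PySem.Chars.splitOn, lbs_go_eq (cs.length + 1) cs [] [] (by omega)]
  cases hr : lbsRuns cs with
  | nil => exact absurd hr (lbsRuns_ne_nil cs)
  | cons r rs => simp

lemma lbsRuns_length (cs : List Char) : (lbsRuns cs).map List.length = lbsRl cs := by
  induction cs with
  | nil => simp [lbsRuns, lbsRl]
  | cons c t ih =>
    unfold lbsRuns lbsRl
    by_cases hc : c = '0'
    · simp [hc, ih]
    · rw [if_neg hc, if_neg hc]
      cases hr : lbsRuns t with
      | nil => exact absurd hr (lbsRuns_ne_nil t)
      | cons r rs =>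
        rw [hr] at ih
        rw [← ih]
        simp

lemma lbsM_ge (a b : Nat) (l : List Nat) : b ≤ lbsM a b l := by
  cases l with
  | nil => simp [lbsM]
  | cons r0 rs =>
    cases rs with
    | nil => simp [lbsM]
    | cons r1 rs' => rw [lbsM_cons_cons]; omega

lemma lbsG_eq_M (cs : List Char) : ∀ a b best : Nat, b ≤ best →
    lbsG cs a b best = max best (lbsM a b (lbsRl cs)) := by
  induction cs with
  | nil => intro a b best h; simp [lbsG, lbsRl, lbsM]; omega
  | cons c t ih =>
    intro a b best h
    by_cases hc : c = '0'
    · have h1 := lbsM_ge 0 (a+1) (lbsRl t)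
      have h2 := lbsRl_ne_nil t
      rw [lbsG, if_pos hc, lbsRl, if_pos hc, ih 0 (a+1) (max best (a+1)) (by omega)]
      cases hl : lbsRl t with
      | nil => exact absurd hl h2
      | cons r1 rs' =>
        rw [hl] at h1
        rw [lbsM_cons_cons a b 0 r1 rs']
        simp only [Nat.add_zero]
        generalize lbsM 0 (a + 1) (r1 :: rs') = X at h1 ⊢
        omega
    · rw [lbsG, if_neg hc, lbsRl, if_neg hc, ih (a+1) (b+1) (max best (b+1)) (by omega)]
      cases hl : lbsRl t with
      | nil => exact absurd hl (lbsRl_ne_nil t)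
      | cons r0 rs =>
        cases rs with
        | nil => unfold lbsM; omega
        | cons r1 rs' =>
          unfold lbsM
          have he : (a+1) + r0 + 1 = a + (r0+1) + 1 := by omega
          rw [he]
          generalize lbsM 0 (a + (r0+1) + 1) (r1 :: rs') = X
          omega

lemma lbsWhile_stop (cs : List Char) (fuel : Nat) (left zeros : Int) (h : ¬ zeros > 1) :
    lbsWhile cs fuel left zeros = (left, zeros) := by
  cases fuel <;> simp [lbsWhile, h]

lemma lbsWhile_two (cs : List Char) : ∀ (fuel left q : Nat), left ≤ q →
    cs[q]? = some '0' → lbsNoZ cs left q → q - left < fuel →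
    lbsWhile cs fuel (left : Int) 2 = ((q : Int) + 1, 1) := by
  intro fuel
  induction fuel with
  | zero => intro left q _ _ _ h; omega
  | succ f ih =>
    intro left q hlq hq hnz hf
    rw [lbsWhile, if_pos (by norm_num), PySem.List.pyGet?_natCast]
    by_cases he : left = q
    · subst he
      rw [if_pos hq, lbsWhile_stop _ _ _ _ (by norm_num)]
      norm_num
    · have hlt : left < q := by omega
      rw [if_neg (hnz left (le_refl _) hlt)]
      have hcast : (left : Int) + 1 = ((left + 1 : Nat) : Int) := by push_cast; ring
      rw [hcast, ih (left + 1) q (by omega) hq (fun k h1 h2 => hnz k (by omega) h2) (by omega)]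

lemma lbs_mem_take_succ (cs : List Char) (r : Nat) (hr : r < cs.length) :
    ('0' ∈ cs.take (r+1)) ↔ ('0' ∈ cs.take r ∨ cs[r] = '0') := by
  rw [List.take_add_one, List.getElem?_eq_getElem hr]
  simp only [Option.toList_some, List.mem_append, List.mem_singleton]
  exact ⟨fun h => h.imp id Eq.symm, fun h => h.imp id Eq.symm⟩

lemma lbs_loopA (cs : List Char) : ∀ (d r : Nat), r + d = cs.length →
    ∀ (a b best : Nat), lbsInv cs r a b →
    ∃ l z, (PySem.List.pyRange (r : Int) (cs.length : Int) 1).foldl (lbsStep cs)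
        (((r : Int) - (b : Int)), (if '0' ∈ cs.take r then (1 : Int) else 0), (best : Int))
      = (l, z, (lbsG (cs.drop r) a b best : Int)) := by
  intro d
  induction d with
  | zero =>
    intro r hd a b best _
    have hr : r = cs.length := by omega
    subst hr
    rw [show PySem.List.pyRange ((cs.length:Nat):Int) ((cs.length:Nat):Int) 1 = [] by
      simp]
    rw [List.drop_length]
    exact ⟨_, _, rfl⟩
  | succ d ih =>
    intro r hd a b best hinv
    obtain ⟨hab, hbr, hnz, hif⟩ := hinv
    have hr : r < cs.length := by omega
    have hget : PySem.List.pyGet? cs (r : Int) = some cs[r] := by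
      rw [PySem.List.pyGet?_natCast, List.getElem?_eq_getElem hr]
    rw [PySem.List.pyRange_one_cons (by exact_mod_cast hr), List.foldl_cons]
    rw [List.drop_eq_getElem_cons hr]
    by_cases hc : cs[r] = '0'
    · by_cases hz : '0' ∈ cs.take r
      · -- a second zero arrives: the while loop advances left past the first one
        rw [if_pos hz] at hif
        obtain ⟨hab', hq, hnz2⟩ := hif
        have hr1 : 1 ≤ r := by
          rcases Nat.eq_zero_or_pos r with h0 | h0
          · subst h0; simp at hz
          · exact h0
        have hstep : lbsStep cs (((r : Int) - (b : Int)), (if '0' ∈ cs.take r then (1 : Int) else 0), (best : Int)) (r : Int)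
            = (((r+1 : Nat) : Int) - ((a+1 : Nat) : Int), (if '0' ∈ cs.take (r+1) then (1 : Int) else 0), ((max best (a+1) : Nat) : Int)) := by
          unfold lbsStep
          rw [hget, if_pos (show some cs[r] = some '0' by rw [hc]), if_pos hz]
          rw [show (r : Int) - (b : Int) = ((r - b : Nat) : Int) by
            push_cast [hbr]; ring]
          rw [show (1 : Int) + 1 = 2 by norm_num]
          dsimp only
          rw [lbsWhile_two cs cs.length (r - b) (r - 1 - a) (by omega) hq
            (fun k h1 h2 => hnz2 k (by omega) (by omega)) (by omega)]
          rw [if_pos ((lbs_mem_take_succ cs r hr).mpr (Or.inr hc))]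
          simp only [Prod.mk.injEq]
          refine ⟨by push_cast; omega, trivial, by push_cast; omega⟩
        rw [hstep]
        rw [show ((r : Int) + 1) = ((r+1 : Nat) : Int) by push_cast; ring]
        rw [show lbsG (cs[r] :: cs.drop (r+1)) a b best
            = lbsG (cs.drop (r+1)) 0 (a+1) (max best (a+1)) by simp [lbsG, hc]]
        refine ih (r+1) (by omega) 0 (a+1) (max best (a+1)) ?_
        refine ⟨by omega, by omega, fun k h1 h2 => absurd (lt_of_le_of_lt h1 h2) (lt_irrefl _), ?_⟩
        rw [if_pos ((lbs_mem_take_succ cs r hr).mpr (Or.inr hc))]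
        refine ⟨by omega, ?_, ?_⟩
        · rw [show r + 1 - 1 - 0 = r by omega, List.getElem?_eq_getElem hr, hc]
        · intro k h1 h2
          exact hnz k (by omega) (by omega)
      · -- the first zero: the window keeps everything seen so far
        rw [if_neg hz] at hif
        obtain ⟨har, hbrr⟩ := hif
        have hstep : lbsStep cs (((r : Int) - (b : Int)), (if '0' ∈ cs.take r then (1 : Int) else 0), (best : Int)) (r : Int)
            = (((r+1 : Nat) : Int) - ((a+1 : Nat) : Int), (if '0' ∈ cs.take (r+1) then (1 : Int) else 0), ((max best (a+1) : Nat) : Int)) := by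
          unfold lbsStep
          rw [hget, if_pos (show some cs[r] = some '0' by rw [hc]), if_neg hz]
          rw [show (0 : Int) + 1 = 1 by norm_num]
          dsimp only
          rw [lbsWhile_stop _ _ _ _ (by norm_num)]
          rw [if_pos ((lbs_mem_take_succ cs r hr).mpr (Or.inr hc))]
          simp only [Prod.mk.injEq]
          refine ⟨by push_cast; omega, trivial, by push_cast; omega⟩
        rw [hstep]
        rw [show ((r : Int) + 1) = ((r+1 : Nat) : Int) by push_cast; ring]
        rw [show lbsG (cs[r] :: cs.drop (r+1)) a b best
            = lbsG (cs.drop (r+1)) 0 (a+1) (max best (a+1)) by simp [lbsG, hc]]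
        refine ih (r+1) (by omega) 0 (a+1) (max best (a+1)) ?_
        refine ⟨by omega, by omega, fun k h1 h2 => absurd (lt_of_le_of_lt h1 h2) (lt_irrefl _), ?_⟩
        rw [if_pos ((lbs_mem_take_succ cs r hr).mpr (Or.inr hc))]
        refine ⟨by omega, ?_, ?_⟩
        · rw [show r + 1 - 1 - 0 = r by omega, List.getElem?_eq_getElem hr, hc]
        · intro k h1 h2
          exact hnz k (by omega) (by omega)
    · -- a one: the window grows by one
      have hstep : lbsStep cs (((r : Int) - (b : Int)), (if '0' ∈ cs.take r then (1 : Int) else 0), (best : Int)) (r : Int)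
          = (((r+1 : Nat) : Int) - ((b+1 : Nat) : Int), (if '0' ∈ cs.take (r+1) then (1 : Int) else 0), ((max best (b+1) : Nat) : Int)) := by
        unfold lbsStep
        rw [hget, if_neg (show ¬ some cs[r] = some '0' by simp [hc])]
        have hmem : ('0' ∈ cs.take (r+1)) ↔ ('0' ∈ cs.take r) := by
          rw [lbs_mem_take_succ cs r hr]
          simp [hc]
        by_cases hz : '0' ∈ cs.take r
        · rw [if_pos hz, if_pos (hmem.mpr hz)]
          dsimp only
          rw [lbsWhile_stop _ _ _ _ (by norm_num)]
          simp only [Prod.mk.injEq]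
          refine ⟨by push_cast; ring, trivial, by push_cast; omega⟩
        · rw [if_neg hz, if_neg (fun h => hz (hmem.mp h))]
          dsimp only
          rw [lbsWhile_stop _ _ _ _ (by norm_num)]
          simp only [Prod.mk.injEq]
          refine ⟨by push_cast; ring, trivial, by push_cast; omega⟩
      rw [hstep]
      rw [show ((r : Int) + 1) = ((r+1 : Nat) : Int) by push_cast; ring]
      rw [show lbsG (cs[r] :: cs.drop (r+1)) a b best
          = lbsG (cs.drop (r+1)) (a+1) (b+1) (max best (b+1)) by simp [lbsG, hc]]
      refine ih (r+1) (by omega) (a+1) (b+1) (max best (b+1)) ?_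
      have hmem : ('0' ∈ cs.take (r+1)) ↔ ('0' ∈ cs.take r) := by
        rw [lbs_mem_take_succ cs r hr]
        simp [hc]
      refine ⟨by omega, by omega, ?_, ?_⟩
      · intro k h1 h2
        by_cases hk : k < r
        · exact hnz k (by omega) hk
        · have hkr : k = r := by omega
          subst hkr
          rw [List.getElem?_eq_getElem hr]
          simp [hc]
      · by_cases hz : '0' ∈ cs.take r
        · rw [if_pos (hmem.mpr hz)]
          rw [if_pos hz] at hif
          obtain ⟨hab', hq, hnz2⟩ := hif
          refine ⟨by omega, ?_, ?_⟩
          · rw [show r + 1 - 1 - (a+1) = r - 1 - a by omega]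
            exact hq
          · intro k h1 h2
            exact hnz2 k (by omega) (by omega)
        · rw [if_neg (fun h => hz (hmem.mp h))]
          rw [if_neg hz] at hif
          omega

lemma lbs_A_eq_G (s : String) :
    longest_binary_substring s = (lbsG s.toList 0 0 0 : Int) := by
  obtain ⟨l, z, h⟩ := lbs_loopA s.toList s.toList.length 0 (by omega) 0 0 0
    ⟨le_refl 0, le_refl 0, fun k h1 h2 => absurd (lt_of_le_of_lt h1 h2) (lt_irrefl _),
     by rw [if_neg (by simp)]; exact ⟨rfl, rfl⟩⟩
  unfold longest_binary_substring
  dsimp only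
  simp only [Nat.cast_zero, Int.sub_zero, List.take_zero, List.drop_zero] at h
  rw [if_neg (by simp : ¬ '0' ∈ ([] : List Char))] at h
  rw [h]

lemma lbs_zipfold (t : List Nat) : ∀ (x acc : Nat), t ≠ [] →
    (((x :: t).zip t).foldl (fun m q => max m (q.1 + 1 + q.2)) acc)
      = max acc (lbsM 0 (x + 1) t) := by
  induction t with
  | nil => intro x acc h; exact absurd rfl h
  | cons y t' ih =>
    intro x acc _
    cases t' with
    | nil => simp [List.zip, lbsM]
    | cons z t'' =>
      rw [List.zip_cons_cons, List.foldl_cons, ih y (max acc (x + 1 + y)) (by simp),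
        lbsM_cons_cons]
      have h1 := lbsM_ge 0 (y + 1) (z :: t'')
      simp only [Nat.zero_add]
      generalize lbsM 0 (y + 1) (z :: t'') = X at *
      omega

lemma lbs_foldcast (ps : List (Nat × Nat)) : ∀ acc : Nat,
    ((ps.map (Prod.map (Nat.cast : Nat → Int) (Nat.cast : Nat → Int))).foldl
        (fun m q => max m (q.1 + 1 + q.2)) (acc : Int))
      = ((ps.foldl (fun m q => max m (q.1 + 1 + q.2)) acc : Nat) : Int) := by
  induction ps with
  | nil => intro acc; simp
  | cons p ps ih =>
    intro acc
    simp only [List.map, List.foldl]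
    rw [← ih]
    congr 1
    push_cast
    rfl

lemma lbs_B_eq_M (s : String) :
    longest_binary_substring_alt s = (lbsM 0 0 (lbsRl s.toList) : Int) := by
  unfold longest_binary_substring_alt
  rw [lbs_splitOn_eq]
  rw [show (lbsRuns s.toList).map (fun p => (p.length : Int))
      = (lbsRl s.toList).map (Nat.cast : Nat → Int) by
    rw [← lbsRuns_length, List.map_map]; rfl]
  cases hl : lbsRl s.toList with
  | nil => exact absurd hl (lbsRl_ne_nil s.toList)
  | cons r0 rs =>
    cases rs with
    | nil => simp [lbsM_single]
    | cons r1 rs' =>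
      simp only [List.map_cons, List.tail_cons, List.zip_cons_cons]
      rw [show ((r1 : Int) :: List.map Nat.cast rs').zip (List.map Nat.cast rs')
          = ((r1 :: rs').zip rs').map (Prod.map (Nat.cast : Nat → Int) (Nat.cast : Nat → Int)) by
        rw [show ((r1 : Int) :: List.map Nat.cast rs') = List.map (Nat.cast : Nat → Int) (r1 :: rs') from rfl]
        exact List.zip_map]
      rw [show ((r0 : Int) + 1 + (r1 : Int)) = ((r0 + 1 + r1 : Nat) : Int) by push_cast; ring]
      rw [lbs_foldcast]
      cases rs' with
      | nil => rw [lbsM_cons_cons, lbsM_single]; simp; omega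
      | cons r2 rs'' =>
        rw [lbs_zipfold (r2 :: rs'') r1 (r0 + 1 + r1) (by simp)]
        rw [lbsM_cons_cons, lbsM_cons_cons]
        simp only [Nat.zero_add]
        have h1 := lbsM_ge 0 (r1 + 1) (r2 :: rs'')
        generalize lbsM 0 (r1 + 1) (r2 :: rs'') = X at *
        push_cast
        omega

-- ===== VERDICT (by name: the statement is the Claim_ definition above) =====
theorem longest_binary_substring_spec : Claim_equal_longest_binary_substring := by
  intro s _
  unfold Spec_longest_binary_substring
  rw [lbs_A_eq_G, lbs_B_eq_M, lbsG_eq_M _ _ _ _ (le_refl 0)]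
  simp
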